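-- pv_equiv track=rewrite | github.com/henryefranks/gb-sound | scripts/generate_tile_data.py | gen_tile
-- ===== SOURCE A (Python) =====
-- def gen_tile(data):
--     res = "dw "
--
--     for row in data:
--         lsb = ""
--         msb = ""
--
--         for tile in row:
--             if tile == "0":
--                 lsb += "0"
--                 msb += "0"
--             elif tile == "1":
--                 lsb += "1"
--                 msb += "0"
--             elif tile == "2":
--                 lsb += "0"
--                 msb += "1"
--             elif tile == "3":
--                 lsb += "1"
--                 msb += "1"
--             else:
--                 raise Exception(f"Invalid Character: {tile}")
--
--         res += f"${int(lsb, 2):02x}{int(msb, 2):02x}, "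
--
--     return res[:-2]
-- ===== SOURCE B (Python) =====
-- def gen_tile(data):
--     parts = []
--     for row in data:
--         lsb = 0
--         msb = 0
--         for tile in row:
--             if tile not in "0123":
--                 raise Exception(f"Invalid Character: {tile}")
--             v = int(tile)
--             lsb = lsb * 2 + (v & 1)
--             msb = msb * 2 + (v >> 1)
--         parts.append(f"${lsb:02x}{msb:02x}")
--     return "dw " + ", ".join(parts)
-- ===== Notes on version B (the rewrite author's own statement) =====
-- stated objective: simpler
-- what changed: Replaces the four-way if/elif chain plus binary-string building and int(s,2) reparsing with a single guarded numeric bit accumulation (lsb*2+(v&1), msb*2+(v>>1)) per row, and builds the output with ', '.join instead of appending separators and slicing them off.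
-- intended difference: On empty data A returns 'd' (the [:-2] slice eating into the 'dw ' prefix), B returns 'dw '; the intact 'dw ' directive is the intended output of a separator join. — e.g. on gen_tile([]): A returns "d", B returns "dw "
import Mathlib
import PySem

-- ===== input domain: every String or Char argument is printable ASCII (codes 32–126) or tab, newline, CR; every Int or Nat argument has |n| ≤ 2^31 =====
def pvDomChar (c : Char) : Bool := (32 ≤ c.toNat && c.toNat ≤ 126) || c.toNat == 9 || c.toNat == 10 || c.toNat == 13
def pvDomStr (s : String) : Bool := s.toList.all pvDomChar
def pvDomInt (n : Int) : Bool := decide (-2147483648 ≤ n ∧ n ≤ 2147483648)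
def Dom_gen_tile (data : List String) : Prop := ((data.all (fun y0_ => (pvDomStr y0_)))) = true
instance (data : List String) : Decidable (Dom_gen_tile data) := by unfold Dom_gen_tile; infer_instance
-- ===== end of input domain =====

set_option maxRecDepth 4096

-- B replaces A's if/elif binary-string building + int(s,2) reparse by numeric bit accumulation and
-- a ", ".join instead of appending separators and slicing two characters off (objective: simpler).

-- ===== PORT A =====
-- A's inner for-loop over a row; none = the explicit `raise Exception(...)` on an invalid character
def tileBitsA : List Char → List Char → List Char → Option (List Char × List Char)
  | [], lsb, msb => some (lsb, msb)
  | c :: rest, lsb, msb =>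
    if c = '0' then tileBitsA rest (lsb ++ ['0']) (msb ++ ['0'])
    else if c = '1' then tileBitsA rest (lsb ++ ['1']) (msb ++ ['0'])
    else if c = '2' then tileBitsA rest (lsb ++ ['0']) (msb ++ ['1'])
    else if c = '3' then tileBitsA rest (lsb ++ ['1']) (msb ++ ['1'])
    else none

-- int(s, 2): hand port, exact on the strings A's loop builds (over '0'/'1'; "" = ValueError = none)
def int2? : List Char → Option Int
  | [] => none
  | cs => some (cs.foldl (fun a c => a * 2 + (if c = '1' then 1 else 0)) 0)

-- f"{n:02x}": lowercase hex, left-padded with '0' to width 2; exact for 0 ≤ n (all values formatted here)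
def fmt02x (n : Int) : List Char := PySem.Chars.zfill (Nat.toDigits 16 n.toNat) 2

def gen_tile (data : List String) : String :=
  let res : Option (List Char) :=
    data.foldl (fun acc row =>
      acc.bind fun r =>
        (tileBitsA row.toList [] []).bind fun p =>
          (int2? p.1).bind fun lv =>
            (int2? p.2).map fun mv =>
              r ++ '$' :: (fmt02x lv ++ fmt02x mv ++ (", ").toList))
      (some ("dw ").toList)
  match res with
  | some r => String.ofList (PySem.List.slice r none (some (-2)))   -- res[:-2]
  | none => ""  -- the exception propagates; excluded by Pre_

-- ===== PORT B =====
-- B's inner loop: numeric bit accumulation; none = the raise on an invalid character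
def rowByteB (cs : List Char) : Option (Int × Int) :=
  cs.foldl (fun st c =>
    st.bind fun p =>
      if c ∈ ['0', '1', '2', '3'] then
        let v : Int := (c.toNat : Int) - 48   -- int(tile), exact for '0'..'3'
        some (p.1 * 2 + PySem.Int.band v 1, p.2 * 2 + v >>> 1)
      else none) (some (0, 0))

def gen_tile_alt (data : List String) : String :=
  let parts : Option (List (List Char)) :=
    data.foldl (fun acc row =>
      acc.bind fun ps => (rowByteB row.toList).map fun p =>
        ps ++ ['$' :: (fmt02x p.1 ++ fmt02x p.2)]) (some [])
  match parts with
  | some ps => String.ofList (("dw ").toList ++ PySem.Chars.join (", ").toList ps)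
  | none => ""

-- ===== PRECONDITION & SPEC =====
-- Pre_ excludes exactly the inputs on which A raises: a row with a character outside '0123'
-- (explicit Exception) or an empty row (int('', 2) raises ValueError).
def Pre_gen_tile (data : List String) : Prop :=
  (data.all fun row => !row.toList.isEmpty && row.toList.all fun c => c ∈ ['0', '1', '2', '3']) = true
instance (data : List String) : Decidable (Pre_gen_tile data) := by unfold Pre_gen_tile; infer_instance
def pvWitness_gen_tile : List String := ["0123", "3"]

-- On empty data A returns "d" (the [:-2] slice eating into the "dw " prefix), B returns "dw ";
-- the intact "dw " directive is the intended output of a separator join.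
def D_gen_tile (data : List String) : Prop := data = []
instance (data : List String) : Decidable (D_gen_tile data) := by unfold D_gen_tile; infer_instance

def Spec_gen_tile (data : List String) (out : String) : Prop := ¬ D_gen_tile data → out = gen_tile_alt data
instance (data : List String) (out : String) : Decidable (Spec_gen_tile data out) := by unfold Spec_gen_tile; infer_instance

def pvDiffWitness_gen_tile : List String := []
def pvDiffWitnessOut_gen_tile : String × String := ("d", "dw ")

-- ===== CLAIM (what is proved, stated in full; the proofs are below) =====
def Claim_unchanged_gen_tile : Prop := ∀ (data : List String), Dom_gen_tile data → Pre_gen_tile data → Spec_gen_tile data (gen_tile data)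
def Claim_changed_gen_tile : Prop := Dom_gen_tile (pvDiffWitness_gen_tile) ∧ Pre_gen_tile (pvDiffWitness_gen_tile) ∧ D_gen_tile (pvDiffWitness_gen_tile) ∧ gen_tile (pvDiffWitness_gen_tile) = pvDiffWitnessOut_gen_tile.1 ∧ gen_tile_alt (pvDiffWitness_gen_tile) = pvDiffWitnessOut_gen_tile.2 ∧ pvDiffWitnessOut_gen_tile.1 ≠ pvDiffWitnessOut_gen_tile.2
def Claim_exact_gen_tile : Prop := ∀ (data : List String), Dom_gen_tile data → Pre_gen_tile data → D_gen_tile data → gen_tile data ≠ gen_tile_alt data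

-- ===== LEMMAS AND PROOFS =====

-- the readable form of Pre_gen_tile (stated as a Bool test so that `decide` is cheap)
theorem pre_iff (data : List String) : Pre_gen_tile data ↔
    ∀ row ∈ data, row.toList ≠ [] ∧ ∀ c ∈ row.toList, c ∈ ['0', '1', '2', '3'] := by
  simp [Pre_gen_tile, List.all_eq_true]

-- the low/high bit of a tile character, as A writes them into lsb/msb
def bitL (c : Char) : Char := if c = '1' ∨ c = '3' then '1' else '0'
def bitM (c : Char) : Char := if c = '2' ∨ c = '3' then '1' else '0'
-- binary value of a bit string, the accumulation shape shared by both proofs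
def bval (a : Int) (cs : List Char) : Int :=
  cs.foldl (fun a c => a * 2 + (if c = '1' then 1 else 0)) a

lemma int2?_cons (c : Char) (t : List Char) : int2? (c :: t) = some (bval 0 (c :: t)) := rfl

lemma tileBitsA_valid (cs : List Char) (h : ∀ c ∈ cs, c ∈ ['0', '1', '2', '3']) :
    ∀ lsb msb, tileBitsA cs lsb msb = some (lsb ++ cs.map bitL, msb ++ cs.map bitM) := by
  induction cs with
  | nil => intro lsb msb; simp [tileBitsA]
  | cons c t ih =>
    intro lsb msb
    have hc := h c (List.mem_cons_self ..)
    have ht : ∀ c ∈ t, c ∈ ['0', '1', '2', '3'] := fun c hm => h c (List.mem_cons_of_mem _ hm)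
    simp only [List.mem_cons, List.not_mem_nil, or_false] at hc
    rcases hc with rfl | rfl | rfl | rfl <;>
      simp [tileBitsA, ih ht, bitL, bitM]

-- B's loop body on a valid tile character produces exactly the two bits A writes
lemma stepB_eq (c : Char) (hc : c ∈ ['0', '1', '2', '3']) (a b : Int) :
    ((some (a, b)).bind fun p =>
       if c ∈ ['0', '1', '2', '3'] then
         let v : Int := (c.toNat : Int) - 48
         some (p.1 * 2 + PySem.Int.band v 1, p.2 * 2 + v >>> 1)
       else none) =
    some (a * 2 + (if bitL c = '1' then (1 : Int) else 0),
          b * 2 + (if bitM c = '1' then (1 : Int) else 0)) := by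
  simp only [List.mem_cons, List.not_mem_nil, or_false] at hc
  rcases hc with rfl | rfl | rfl | rfl <;>
    simp [bitL, bitM,
      show PySem.Int.band 0 1 = (0 : Int) from by decide,
      show PySem.Int.band 2 1 = (0 : Int) from by decide,
      show PySem.Int.band 3 1 = (1 : Int) from by decide,
      show (0 : Int) >>> (1 : Int) = 0 from by decide,
      show (1 : Int) >>> (1 : Int) = 0 from by decide,
      show (2 : Int) >>> (1 : Int) = 1 from by decide,
      show (3 : Int) >>> (1 : Int) = 1 from by decide]

lemma rowByteB_valid (cs : List Char) (h : ∀ c ∈ cs, c ∈ ['0', '1', '2', '3']) :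
    ∀ a b : Int,
      cs.foldl (fun st c =>
        st.bind fun p =>
          if c ∈ ['0', '1', '2', '3'] then
            let v : Int := (c.toNat : Int) - 48
            some (p.1 * 2 + PySem.Int.band v 1, p.2 * 2 + v >>> 1)
          else none) (some (a, b)) =
      some (bval a (cs.map bitL), bval b (cs.map bitM)) := by
  induction cs with
  | nil => intro a b; simp [bval]
  | cons c t ih =>
    intro a b
    have hc := h c (List.mem_cons_self ..)
    have ht : ∀ c ∈ t, c ∈ ['0', '1', '2', '3'] := fun c hm => h c (List.mem_cons_of_mem _ hm)
    rw [List.foldl_cons]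
    show t.foldl _ ((some (a, b)).bind fun p =>
       if c ∈ ['0', '1', '2', '3'] then
         let v : Int := (c.toNat : Int) - 48
         some (p.1 * 2 + PySem.Int.band v 1, p.2 * 2 + v >>> 1)
       else none) = _
    rw [stepB_eq c hc a b, List.map_cons, List.map_cons]
    exact ih ht _ _

-- the byte string a row contributes in B (and, with ", " appended, in A)
def byteStr (row : String) : List Char :=
  '$' :: (fmt02x (bval 0 (row.toList.map bitL)) ++ fmt02x (bval 0 (row.toList.map bitM)))

lemma foldA_eq (data : List String)
    (h : ∀ row ∈ data, row.toList ≠ [] ∧ ∀ c ∈ row.toList, c ∈ ['0', '1', '2', '3']) :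
    ∀ r : List Char,
      data.foldl (fun acc row =>
        acc.bind fun r =>
          (tileBitsA row.toList [] []).bind fun p =>
            (int2? p.1).bind fun lv =>
              (int2? p.2).map fun mv =>
                r ++ '$' :: (fmt02x lv ++ fmt02x mv ++ (", ").toList)) (some r) =
      some (r ++ data.flatMap (fun row => byteStr row ++ (", ").toList)) := by
  induction data with
  | nil => intro r; simp
  | cons row t ih =>
    intro r
    obtain ⟨hne, hv⟩ := h row (List.mem_cons_self ..)
    have ht : ∀ row ∈ t, row.toList ≠ [] ∧ ∀ c ∈ row.toList, c ∈ ['0', '1', '2', '3'] :=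
      fun x hm => h x (List.mem_cons_of_mem _ hm)
    obtain ⟨c, cs, hct⟩ := List.exists_cons_of_ne_nil hne
    have hv' : ∀ x ∈ (c :: cs), x ∈ ['0', '1', '2', '3'] := hct ▸ hv
    have hA := tileBitsA_valid (c :: cs) hv' [] []
    simp only [List.foldl_cons, Option.bind_some]
    rw [hct]
    simp only [hA, List.nil_append, List.map_cons, int2?_cons, Option.bind_some,
      Option.map_some, ih ht]
    simp [byteStr, hct, bval]

lemma foldB_eq (data : List String)
    (h : ∀ row ∈ data, ∀ c ∈ row.toList, c ∈ ['0', '1', '2', '3']) :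
    ∀ ps : List (List Char),
      data.foldl (fun acc row =>
        acc.bind fun ps => (rowByteB row.toList).map fun p =>
          ps ++ ['$' :: (fmt02x p.1 ++ fmt02x p.2)]) (some ps) =
      some (ps ++ data.map byteStr) := by
  induction data with
  | nil => intro ps; simp
  | cons row t ih =>
    intro ps
    have hv := h row (List.mem_cons_self ..)
    have ht : ∀ row ∈ t, ∀ c ∈ row.toList, c ∈ ['0', '1', '2', '3'] :=
      fun x hm => h x (List.mem_cons_of_mem _ hm)
    have hB : rowByteB row.toList =
        some (bval 0 (row.toList.map bitL), bval 0 (row.toList.map bitM)) := by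
      rw [rowByteB]; exact rowByteB_valid row.toList hv 0 0
    simp [hB, ih ht, byteStr]

lemma flatMap_sep (sep : List Char) (f : String → List Char) (l : List String) (hne : l ≠ []) :
    l.flatMap (fun r => f r ++ sep) = sep.intercalate (l.map f) ++ sep := by
  induction l with
  | nil => exact absurd rfl hne
  | cons p t ih =>
    cases t with
    | nil => simp [List.intercalate]
    | cons q u =>
      rw [List.flatMap_cons, ih (by simp)]
      simp [List.intercalate]

lemma gen_tile_eq_alt (data : List String) (hd : data ≠ []) (hpre0 : Pre_gen_tile data) :
    gen_tile data = gen_tile_alt data := by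
  have hpre := (pre_iff data).mp hpre0
  have hv : ∀ row ∈ data, ∀ c ∈ row.toList, c ∈ ['0', '1', '2', '3'] :=
    fun row hm => (hpre row hm).2
  rw [gen_tile, gen_tile_alt]
  simp only [foldA_eq data hpre, foldB_eq data hv, List.nil_append]
  have hps : data.map byteStr ≠ [] := by simpa using hd
  rw [flatMap_sep (", ").toList byteStr data hd]
  set X := ("dw ").toList ++ ((", ").toList.intercalate (data.map byteStr)) with hX
  have hassoc : ("dw ").toList ++ ((", ").toList.intercalate (data.map byteStr) ++ (", ").toList)
      = X ++ (", ").toList := by rw [hX, List.append_assoc]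
  rw [hassoc, PySem.List.slice_to_neg_ofNat (X ++ (", ").toList) 2 (by omega)]
  have hlen : (X ++ (", ").toList).length - 2 = X.length := by simp
  rw [hlen, List.take_left]
  rfl

-- ===== VERDICT (by name: the statement is the Claim_ definition above) =====
theorem gen_tile_spec : Claim_unchanged_gen_tile := by
  intro data _ hpre hD
  exact gen_tile_eq_alt data (by unfold D_gen_tile at hD; exact hD) hpre

theorem gen_tile_changed : Claim_changed_gen_tile := by
  unfold Claim_changed_gen_tile; decide

theorem gen_tile_tight : Claim_exact_gen_tile := by
  intro data _ _ hD
  unfold D_gen_tile at hD; subst hD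
  decide
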